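-- pv_equiv track=rewrite | github.com/chanduv2017/4-Queens-visualizer | main.py | min_conflict_value
-- ===== SOURCE A (Python) =====
-- def conflicts(state, row, col):
--     count = 0
--     for i in range(len(state)):
--         if i != row:
--             if state[i] == col or abs(i - row) == abs(state[i] - col):
--                 count += 1
--     return count
--
-- def min_conflict_value(state, row):
--     min_conflict_count = float('inf')
--     min_conflict_col = -1
--     for col in range(len(state)):
--         conflict_count = conflicts(state, row, col)
--         if conflict_count < min_conflict_count:
--             min_conflict_count = conflict_count
--             min_conflict_col = col
--     return min_conflict_col
-- ===== SOURCE B (Python) =====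
-- def min_conflict_value(state, row):
--     n = len(state)
--     counts = [0] * n
--     for i, q in enumerate(state):
--         if i != row:
--             d = abs(i - row)
--             for t in (q, q + d, q - d):
--                 if 0 <= t < n:
--                     counts[t] += 1
--     if not counts:
--         return -1
--     return counts.index(min(counts))
-- ===== Notes on version B (the rewrite author's own statement) =====
-- stated objective: faster
-- what changed: Instead of rescanning all queens once per candidate column, B makes one scatter pass over the queens incrementing a per-column conflict table at the three columns each queen attacks in the given row, then returns the first index of the table's minimum (first-wins tie-breaking, -1 for empty state).
import Mathlib
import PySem

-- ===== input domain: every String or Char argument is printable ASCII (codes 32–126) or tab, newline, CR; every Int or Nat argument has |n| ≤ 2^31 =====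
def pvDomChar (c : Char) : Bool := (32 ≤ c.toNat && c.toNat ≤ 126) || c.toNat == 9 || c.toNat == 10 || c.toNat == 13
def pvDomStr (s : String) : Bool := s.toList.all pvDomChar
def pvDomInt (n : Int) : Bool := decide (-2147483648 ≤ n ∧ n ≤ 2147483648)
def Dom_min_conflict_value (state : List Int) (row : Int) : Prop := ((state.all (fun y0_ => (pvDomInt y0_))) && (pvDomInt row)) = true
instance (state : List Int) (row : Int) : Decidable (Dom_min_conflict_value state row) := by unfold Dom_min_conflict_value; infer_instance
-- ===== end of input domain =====

-- B replaces A's per-column rescan of all queens by one scatter pass over the queens into a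
-- conflicts table followed by min/index; objective: faster (a linear pass instead of nested loops).


-- ===== PORT A =====
def conflicts (state : List Int) (row col : Int) : Int :=
  (PySem.List.pyRange 0 (PySem.List.len state) 1).foldl
    (fun count i =>
      if i ≠ row then
        if PySem.List.pyGetD state i 0 = col ∨
            (i - row).natAbs = ((PySem.List.pyGetD state i 0) - col).natAbs
        then count + 1 else count
      else count) 0

def min_conflict_value (state : List Int) (row : Int) : Int :=
  ((PySem.List.pyRange 0 (PySem.List.len state) 1).foldl
    (fun (acc : Option Int × Int) col =>
      let c := conflicts state row col
      if (match acc.1 with | none => true | some b => decide (c < b)) = true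
      then (some c, col) else acc)
    (none, -1)).2

-- ===== PORT B =====
-- `counts[t] += 1` guarded by `0 <= t < n`
def pvBump (n : Nat) (cs : List Int) (t : Int) : List Int :=
  if 0 ≤ t ∧ t < (n : Int) then PySem.List.pySetD cs t (PySem.List.pyGetD cs t 0 + 1) else cs

def min_conflict_value_alt (state : List Int) (row : Int) : Int :=
  let n := state.length
  let counts := (PySem.List.enumerate state 0).foldl
    (fun cs p =>
      if p.1 ≠ row then
        [p.2, p.2 + ((p.1 - row).natAbs : Int), p.2 - ((p.1 - row).natAbs : Int)].foldl
          (pvBump n) cs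
      else cs)
    (List.replicate n (0 : Int))
  match PySem.List.min? counts (fun x => x) with
  | none => -1
  | some m => ((PySem.List.index? counts m).getD 0 : Int)

-- ===== PRECONDITION & SPEC =====
def Spec_min_conflict_value (state : List Int) (row : Int) (out : Int) : Prop := out = min_conflict_value_alt state row
instance (state : List Int) (row : Int) (out : Int) : Decidable (Spec_min_conflict_value state row out) := by unfold Spec_min_conflict_value; infer_instance

-- ===== CLAIM (what is proved, stated in full; the proofs are below) =====
def Claim_equal_min_conflict_value : Prop := ∀ (state : List Int) (row : Int), Dom_min_conflict_value state row → Spec_min_conflict_value state row (min_conflict_value state row)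

-- ===== LEMMAS AND PROOFS =====

-- the per-queen conflict predicate both programs count
def pvPred (row c : Int) (p : Int × Int) : Bool :=
  decide (p.1 ≠ row) && (decide (p.2 = c) || decide ((p.1 - row).natAbs = (p.2 - c).natAbs))

lemma pv_conflicts_eq (state : List Int) (row c : Int) :
    conflicts state row c = ((PySem.List.enumerate state 0).countP (pvPred row c) : Int) := by
  rw [conflicts, PySem.List.enumerate_eq_map_pyRange state 0, List.countP_map]
  rw [List.foldl_ext (g := fun count i =>
        if (pvPred row c ∘ fun j => (j, PySem.List.pyGetD state j 0)) i = true
        then count + 1 else count)]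
  · rw [PySem.List.foldl_count_if]; simp
  · intro a x hx
    simp only [Function.comp, pvPred]
    by_cases h1 : x = row
    · simp [h1]
    · by_cases h2 : PySem.List.pyGetD state x 0 = c
      · simp [h1, h2]
      · by_cases h3 : (x - row).natAbs = ((PySem.List.pyGetD state x 0) - c).natAbs
        · simp [h1, h2, h3]
        · simp [h1, h2, h3]

-- B's builder step (definitionally the lambda in min_conflict_value_alt)
def pvStep (n : Nat) (row : Int) (cs : List Int) (p : Int × Int) : List Int :=
  if p.1 ≠ row then
    [p.2, p.2 + ((p.1 - row).natAbs : Int), p.2 - ((p.1 - row).natAbs : Int)].foldl (pvBump n) cs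
  else cs

lemma pv_bump_len (n : Nat) (cs : List Int) (t : Int) : (pvBump n cs t).length = cs.length := by
  unfold pvBump; split
  · exact PySem.List.length_pySetD cs t _
  · rfl

lemma pv_bump_get (n : Nat) (cs : List Int) (t : Int) (c : Nat)
    (hc : c < cs.length) :
    (pvBump n cs t).getD c 0 = cs.getD c 0 + (if (c : Int) = t ∧ t < (n : Int) then 1 else 0) := by
  unfold pvBump
  split
  case isTrue h =>
    rw [PySem.List.pySetD_of_nonneg cs _ h.1]
    by_cases he : (c : Int) = t
    · have ht : t.toNat = c := by omega
      have : PySem.List.pyGetD cs t 0 = cs.getD c 0 := by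
        rw [← he, PySem.List.pyGetD_natCast]
      simp [ht, he, h.2, this, List.getD_eq_getElem?_getD, hc]
    · have ht : t.toNat ≠ c := by omega
      simp [he, List.getD_eq_getElem?_getD, List.getElem?_set_ne ht]
  case isFalse h =>
    have : ¬((c : Int) = t ∧ t < (n : Int)) := by
      rintro ⟨rfl, hn⟩; exact h ⟨by positivity, hn⟩
    simp [this]

lemma pv_step_len (n : Nat) (row : Int) (cs : List Int) (p : Int × Int) :
    (pvStep n row cs p).length = cs.length := by
  unfold pvStep; split
  · simp [List.foldl, pv_bump_len]
  · rfl

lemma pv_step_get (n : Nat) (row : Int) (cs : List Int) (p : Int × Int) (c : Nat)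
    (hlen : cs.length = n) (hc : c < n) :
    (pvStep n row cs p).getD c 0 = cs.getD c 0 + (if pvPred row (c : Int) p then 1 else 0) := by
  unfold pvStep
  split
  case isTrue hne =>
    have hd : (p.1 - row) ≠ 0 := sub_ne_zero.mpr hne
    simp only [List.foldl]
    rw [pv_bump_get n _ _ c (by simp [pv_bump_len, hlen, hc]),
        pv_bump_get n _ _ c (by simp [pv_bump_len, hlen, hc]),
        pv_bump_get n _ _ c (by simp [hlen, hc])]
    have hcn : (c : Int) < (n : Int) := by exact_mod_cast hc
    have hp : pvPred row (c : Int) p =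
        (decide (p.2 = (c : Int)) || decide ((p.1 - row).natAbs = (p.2 - (c : Int)).natAbs)) := by
      simp [pvPred, hne]
    rw [hp]
    by_cases h1 : p.2 = (c : Int) <;>
      by_cases h2 : (p.1 - row).natAbs = (p.2 - (c : Int)).natAbs <;>
      simp only [h1, h2, decide_true, decide_false, Bool.or_self, Bool.true_or, Bool.or_true,
        if_true, if_false, true_and, Bool.false_eq_true] <;>
      rw [Int.natAbs_eq_natAbs_iff] at h2 <;>
      split_ifs <;> omega
  case isFalse hne =>
    have : pvPred row (c : Int) p = false := by simp [pvPred]; intro h; exact absurd h hne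
    simp [this]

lemma pv_build_len (n : Nat) (row : Int) (L : List (Int × Int)) (cs : List Int) :
    (L.foldl (pvStep n row) cs).length = cs.length := by
  induction L generalizing cs with
  | nil => rfl
  | cons p L ih => simp [List.foldl, ih, pv_step_len]

lemma pv_build_get (n : Nat) (row : Int) (L : List (Int × Int)) (cs : List Int) (c : Nat)
    (hlen : cs.length = n) (hc : c < n) :
    (L.foldl (pvStep n row) cs).getD c 0 = cs.getD c 0 + (L.countP (pvPred row (c : Int)) : Int) := by
  induction L generalizing cs with
  | nil => simp
  | cons p L ih =>
      simp only [List.foldl, List.countP_cons]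
      rw [ih _ (by rw [pv_step_len]; exact hlen), pv_step_get n row cs p c hlen hc]
      by_cases h : pvPred row (c : Int) p <;> simp [h] <;> ring

-- A's selection loop, as structural recursion over the per-column conflict values
def pvScan : List Int → Option Int × Int → Int → Option Int × Int
  | [], acc, _ => acc
  | x :: xs, acc, i =>
      pvScan xs (if (match acc.1 with | none => true | some b => decide (x < b)) = true
                 then (some x, i) else acc) (i + 1)

lemma pv_foldl_min_le (xs : List Int) (b : Int) : xs.foldl min b ≤ b := by
  induction xs generalizing b with
  | nil => simp
  | cons x xs ih => exact le_trans (ih _) (min_le_left _ _)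

lemma pv_foldl_min_mem (xs : List Int) (b : Int) : xs.foldl min b = b ∨ xs.foldl min b ∈ xs := by
  induction xs generalizing b with
  | nil => simp
  | cons x xs ih =>
      rcases ih (min b x) with h | h
      · rcases le_total b x with hbx | hbx
        · left; simpa [min_eq_left hbx] using h
        · right; simp only [List.foldl]; rw [h, min_eq_right hbx]; exact List.mem_cons_self
      · right; exact List.mem_cons_of_mem _ h

lemma pv_idx_cons_mem (x : Int) (xs : List Int) (m : Int) (hne : x ≠ m) (hm : m ∈ xs) :
    ((PySem.List.index? (x :: xs) m).getD 0 : Int) = 1 + ((PySem.List.index? xs m).getD 0 : Int) := by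
  rw [PySem.List.index?_cons_of_ne xs hne]
  obtain ⟨k, hk⟩ := Option.isSome_iff_exists.mp ((PySem.List.index?_isSome_iff xs m).mpr hm)
  rw [hk]; simp; omega

lemma pv_scan_some (xs : List Int) : ∀ (b c i : Int),
    (pvScan xs (some b, c) i).2 =
      if xs.foldl min b < b then i + ((PySem.List.index? xs (xs.foldl min b)).getD 0 : Int) else c := by
  induction xs with
  | nil => intro b c i; simp [pvScan]
  | cons x xs ih =>
      intro b c i
      simp only [pvScan, List.foldl]
      by_cases hxb : x < b
      · rw [if_pos (by simp [hxb]), min_eq_right (le_of_lt hxb), ih]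
        have hle := pv_foldl_min_le xs x
        rw [if_pos (lt_of_le_of_lt hle hxb)]
        by_cases hmx : xs.foldl min x < x
        · rw [if_pos hmx]
          have hmem : xs.foldl min x ∈ xs := by
            rcases pv_foldl_min_mem xs x with h | h
            · omega
            · exact h
          rw [pv_idx_cons_mem x xs _ (by omega) hmem]; ring
        · rw [if_neg hmx]
          have : xs.foldl min x = x := le_antisymm hle (not_lt.mp hmx)
          rw [this, PySem.List.index?_cons_self]; simp
      · rw [if_neg (by simp [hxb]), min_eq_left (not_lt.mp hxb), ih]
        by_cases hmb : xs.foldl min b < b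
        · rw [if_pos hmb, if_pos hmb]
          have hmem : xs.foldl min b ∈ xs := by
            rcases pv_foldl_min_mem xs b with h | h
            · omega
            · exact h
          rw [pv_idx_cons_mem x xs _ (by omega) hmem]; ring
        · rw [if_neg hmb, if_neg hmb]

lemma pv_scan_spec (l : List Int) :
    (pvScan l (none, -1) 0).2 =
      match PySem.List.min? l (fun x => x) with
      | none => -1
      | some m => ((PySem.List.index? l m).getD 0 : Int) := by
  cases l with
  | nil => rfl
  | cons x xs =>
      rw [PySem.List.min?_id_cons]
      simp only [pvScan, if_pos]
      rw [pv_scan_some]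
      have hle := pv_foldl_min_le xs x
      by_cases hmx : xs.foldl min x < x
      · rw [if_pos hmx]
        have hmem : xs.foldl min x ∈ xs := by
          rcases pv_foldl_min_mem xs x with h | h
          · omega
          · exact h
        rw [pv_idx_cons_mem x xs _ (by omega) hmem]; ring
      · rw [if_neg hmx]
        have : xs.foldl min x = x := le_antisymm hle (not_lt.mp hmx)
        rw [this, PySem.List.index?_cons_self]; simp

lemma pv_scan_bridge (g : Int → Int) : ∀ (l : List Int) (acc : Option Int × Int) (i : Int),
    (∀ (k : Nat), k < l.length → g (i + k) = l.getD k 0) →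
    ((PySem.List.pyRange i (i + l.length) 1).foldl
      (fun (acc : Option Int × Int) col =>
        let c := g col
        if (match acc.1 with | none => true | some b => decide (c < b)) = true
        then (some c, col) else acc) acc) = pvScan l acc i := by
  intro l
  induction l with
  | nil =>
      intro acc i h
      have : PySem.List.pyRange i (i + (0:Nat)) 1 = [] := by
        simp [PySem.List.pyRange]
      simp only [List.length_nil] at *
      rw [this]
      rfl
  | cons x xs ih =>
      intro acc i h
      have hlt : i < i + ((x :: xs).length : Int) := by
        simp only [List.length_cons]; push_cast; omega
      rw [PySem.List.pyRange_one_cons hlt]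
      simp only [List.foldl]
      have hx : g i = x := by
        have := h 0 (by simp)
        simpa using this
      have harg : i + ((x :: xs).length : Int) = (i + 1) + (xs.length : Int) := by
        simp only [List.length_cons]; push_cast; omega
      rw [harg, ih _ (i + 1) (fun k hk => by
        have := h (k + 1) (by simpa using Nat.succ_lt_succ hk)
        simpa [add_assoc, add_comm, add_left_comm] using this)]
      rw [hx]
      conv_rhs => rw [pvScan]

-- ===== VERDICT (by name: the statement is the Claim_ definition above) =====
theorem min_conflict_value_spec : Claim_equal_min_conflict_value := by
  intro state row _
  unfold Spec_min_conflict_value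
  set counts := (PySem.List.enumerate state 0).foldl (pvStep state.length row)
      (List.replicate state.length (0 : Int)) with hcounts
  have hlen : counts.length = state.length := by
    rw [hcounts, pv_build_len]; simp
  have hget : ∀ (k : Nat), k < counts.length →
      conflicts state row ((0 : Int) + (k : Int)) = counts.getD k 0 := by
    intro k hk
    rw [hlen] at hk
    rw [zero_add, pv_conflicts_eq, hcounts,
        pv_build_get state.length row _ _ k (by simp) hk]
    simp
  have hb := pv_scan_bridge (conflicts state row) counts (none, -1) 0 hget
  have hrange : PySem.List.len state = (0 : Int) + (counts.length : Int) := by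
    rw [PySem.List.len_eq, hlen]; ring
  have hA : min_conflict_value state row = (pvScan counts (none, -1) 0).2 := by
    rw [min_conflict_value, hrange, hb]
  have hB : min_conflict_value_alt state row =
      match PySem.List.min? counts (fun x => x) with
      | none => -1
      | some m => ((PySem.List.index? counts m).getD 0 : Int) := rfl
  rw [hA, hB, pv_scan_spec]
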